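-- pv_equiv track=rewrite | github.com/dw-flyingw/HPE-Voxels | nifti2obj.py | _normalize_label_name
-- ===== SOURCE A (Python) =====
-- def _normalize_label_name(name: str) -> str:
--     """Normalize label names for robust matching between filenames and JSON names."""
--     if not isinstance(name, str):
--         return ""
--     s = name.lower()
--     s = s.replace("-", "_").replace(" ", "_")
--     # Collapse multiple underscores and trim
--     while "__" in s:
--         s = s.replace("__", "_")
--     return s.strip("_")
-- ===== SOURCE B (Python) =====
-- def _normalize_label_name(name: str) -> str:
--     """Normalize label names for robust matching between filenames and JSON names."""
--     if not isinstance(name, str):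
--         return ""
--     s = name.lower().replace("-", "_").replace(" ", "_")
--     # Tokenize once, drop empty tokens, rejoin: collapses runs and trims ends.
--     return "_".join(p for p in s.split("_") if p)
-- ===== Notes on version B (the rewrite author's own statement) =====
-- stated objective: idiomatic
-- what changed: Replaces the iterative while-'__'-in-s replace-to-fixpoint loop plus strip('_') with a single tokenize: split on '_', drop empty tokens, rejoin with '_'.
import Mathlib
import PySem

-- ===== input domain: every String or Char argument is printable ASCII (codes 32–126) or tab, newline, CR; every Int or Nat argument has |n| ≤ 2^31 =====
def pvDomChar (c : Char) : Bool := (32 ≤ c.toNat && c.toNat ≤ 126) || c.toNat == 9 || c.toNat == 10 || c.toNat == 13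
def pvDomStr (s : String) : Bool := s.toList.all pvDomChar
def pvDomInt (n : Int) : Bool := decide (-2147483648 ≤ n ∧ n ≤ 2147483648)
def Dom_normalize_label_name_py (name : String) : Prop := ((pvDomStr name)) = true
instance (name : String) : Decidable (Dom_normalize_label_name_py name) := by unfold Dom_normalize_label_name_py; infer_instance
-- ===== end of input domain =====

-- B replaces A's while-'__'-in-s replace loop + strip('_') with split on '_' / drop empty
-- tokens / rejoin (idiomatic, single tokenization pass); return values proved equal for all inputs.

-- ===== PORT A =====
-- A-side helpers: a structural characterisation of s.replace("__","_"), needed to prove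
-- termination of the while loop (each pass strictly shrinks a string containing "__").
def pvRep : List Char → List Char
  | [] => []
  | [c] => [c]
  | c :: d :: t => if c = '_' ∧ d = '_' then '_' :: pvRep t else c :: pvRep (d :: t)

def pvHasDD : List Char → Bool
  | [] => false
  | [_] => false
  | c :: d :: t => if c = '_' ∧ d = '_' then true else pvHasDD (d :: t)

theorem pvGo_nil (fuel : Nat) (acc : List Char) :
    PySem.Chars.replace.go ['_', '_'] ['_'] fuel [] acc = acc.reverse := by
  cases fuel with
  | zero => show acc.reverse ++ [] = acc.reverse; simp
  | succ n => rfl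

theorem pvRep_go_spec (fuel : Nat) : ∀ (l acc : List Char), l.length ≤ fuel →
    PySem.Chars.replace.go ['_', '_'] ['_'] fuel l acc = acc.reverse ++ pvRep l := by
  induction fuel with
  | zero =>
    intro l acc h
    have : l = [] := List.length_eq_zero_iff.mp (Nat.le_zero.mp h)
    subst this
    rw [pvGo_nil]
    simp [pvRep]
  | succ n ih =>
    intro l acc h
    match l with
    | [] => rw [pvGo_nil]; simp [pvRep]
    | c :: t =>
      rw [show PySem.Chars.replace.go ['_', '_'] ['_'] (n+1) (c :: t) acc =
            (if List.isPrefixOf ['_', '_'] (c :: t) then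
              PySem.Chars.replace.go ['_', '_'] ['_'] n (List.drop 2 (c :: t)) (['_'].reverse ++ acc)
            else PySem.Chars.replace.go ['_', '_'] ['_'] n t (c :: acc)) from rfl]
      rcases t with _ | ⟨d, u⟩
      · rw [if_neg (by simp [List.isPrefixOf])]
        rw [pvGo_nil]
        simp [pvRep]
      · simp only [List.length_cons] at h
        by_cases hc : c = '_' ∧ d = '_'
        · obtain ⟨hc1, hc2⟩ := hc
          subst hc1; subst hc2
          rw [if_pos (by simp [List.isPrefixOf])]
          rw [show List.drop 2 ('_' :: '_' :: u) = u from rfl]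
          rw [ih u (['_'].reverse ++ acc) (by omega)]
          simp [pvRep]
        · have hnp : List.isPrefixOf ['_', '_'] (c :: d :: u) = false := by
            rw [Bool.eq_false_iff]
            intro hy
            rw [List.isPrefixOf_iff_prefix] at hy
            obtain ⟨r, hr⟩ := hy
            simp at hr
            exact hc ⟨hr.1.symm, hr.2.1.symm⟩
          rw [hnp]
          simp only [Bool.false_eq_true, if_false]
          rw [ih (d :: u) (c :: acc) (by simp; omega)]
          have hrep : pvRep (c :: d :: u) = c :: pvRep (d :: u) := by
            simp only [pvRep, if_neg hc]
          rw [hrep]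
          simp

theorem pvReplace_eq_rep (l : List Char) :
    PySem.Chars.replace l ['_', '_'] ['_'] = pvRep l := by
  show (if List.isEmpty ['_', '_'] = true then _ else PySem.Chars.replace.go ['_', '_'] ['_'] l.length l []) = _
  rw [if_neg (by simp)]
  rw [pvRep_go_spec l.length l [] (Nat.le_refl _)]
  simp

theorem pvHasDD_iff : ∀ (l : List Char), (pvHasDD l = true ↔ ['_', '_'] <:+: l)
  | [] => by
    simp only [pvHasDD, Bool.false_eq_true, false_iff]
    intro h
    exact absurd h.length_le (by simp)
  | [c] => by
    simp only [pvHasDD, Bool.false_eq_true, false_iff]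
    intro h
    exact absurd h.length_le (by simp)
  | c :: d :: t => by
    simp only [pvHasDD]
    by_cases hc : c = '_' ∧ d = '_'
    · rw [if_pos hc]
      obtain ⟨hc1, hc2⟩ := hc
      subst hc1; subst hc2
      simp only [true_iff]
      exact ⟨[], t, rfl⟩
    · rw [if_neg hc]
      constructor
      · intro h
        obtain ⟨s1, s2, hs⟩ := (pvHasDD_iff (d :: t)).mp h
        exact ⟨c :: s1, s2, by simp only [List.cons_append]; rw [hs]⟩
      · intro h
        rcases List.infix_cons_iff.mp h with hpre | h2
        · obtain ⟨r, hr⟩ := hpre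
          simp at hr
          exact absurd ⟨hr.1.symm, hr.2.1.symm⟩ hc
        · exact (pvHasDD_iff (d :: t)).mpr h2

theorem pvIsIn_eq_hasDD (l : List Char) : PySem.Chars.isIn ['_', '_'] l = pvHasDD l := by
  rw [Bool.eq_iff_iff, PySem.Chars.isIn_iff_infix, pvHasDD_iff]

theorem pvRep_len_le : ∀ (l : List Char), (pvRep l).length ≤ l.length
  | [] => by simp [pvRep]
  | [c] => by simp [pvRep]
  | c :: d :: t => by
    by_cases hc : c = '_' ∧ d = '_'
    · simp only [pvRep, if_pos hc]
      have := pvRep_len_le t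
      simp only [List.length_cons]
      omega
    · simp only [pvRep, if_neg hc]
      have := pvRep_len_le (d :: t)
      simp only [List.length_cons] at *
      omega

theorem pvRep_len_lt : ∀ (l : List Char), pvHasDD l = true → (pvRep l).length < l.length
  | [] => by simp [pvHasDD]
  | [c] => by simp [pvHasDD]
  | c :: d :: t => by
    intro h
    by_cases hc : c = '_' ∧ d = '_'
    · simp only [pvRep, if_pos hc]
      have := pvRep_len_le t
      simp only [List.length_cons]
      omega
    · simp only [pvHasDD, if_neg hc] at h
      simp only [pvRep, if_neg hc]
      have := pvRep_len_lt (d :: t) h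
      simp only [List.length_cons] at *
      omega

-- while "__" in s: s = s.replace("__", "_")
def nlnLoop (s : List Char) : List Char :=
  if PySem.Chars.isIn ['_', '_'] s then nlnLoop (PySem.Chars.replace s ['_', '_'] ['_']) else s
termination_by s.length
decreasing_by
  rename_i h
  rw [pvReplace_eq_rep]
  exact pvRep_len_lt s (by rw [← pvIsIn_eq_hasDD]; exact h)

def normalize_label_name_py (name : String) : String :=
  let s := PySem.Str.replace (PySem.Str.replace (PySem.Str.lower name) "-" "_") " " "_"
  String.mk (PySem.Chars.stripChars (nlnLoop s.toList) ['_'])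

-- ===== PORT B =====
def normalize_label_name_py_alt (name : String) : String :=
  let s := PySem.Str.replace (PySem.Str.replace (PySem.Str.lower name) "-" "_") " " "_"
  String.mk (PySem.Chars.join ['_'] ((PySem.Chars.splitOn s.toList ['_']).filter (fun p => !p.isEmpty)))

-- ===== PRECONDITION & SPEC =====
def Spec_normalize_label_name_py (name : String) (out : String) : Prop := out = normalize_label_name_py_alt name
instance (name : String) (out : String) : Decidable (Spec_normalize_label_name_py name out) := by unfold Spec_normalize_label_name_py; infer_instance

-- ===== CLAIM (what is proved, stated in full; the proofs are below) =====
def Claim_equal_normalize_label_name_py : Prop := ∀ (name : String), Dom_normalize_label_name_py name → Spec_normalize_label_name_py name (normalize_label_name_py name)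

-- ===== LEMMAS AND PROOFS =====

-- B-side characterisation: s.split("_") as a structural recursion.
def pvSplitU : List Char → List (List Char)
  | [] => [[]]
  | c :: t =>
    if c = '_' then [] :: pvSplitU t
    else match pvSplitU t with
         | [] => [[c]]
         | p :: ps => (c :: p) :: ps

def pvFilt (xs : List (List Char)) : List (List Char) := xs.filter (fun p => !p.isEmpty)

def pvRstrip (x : List Char) : List Char :=
  (List.dropWhile (fun c => c == '_') x.reverse).reverse

def pvStrip (x : List Char) : List Char :=
  pvRstrip (List.dropWhile (fun c => c == '_') x)

theorem pvSplitU_ne_nil : ∀ (l : List Char), pvSplitU l ≠ []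
  | [] => by simp [pvSplitU]
  | c :: t => by
    simp only [pvSplitU]
    split
    · simp
    · split <;> simp

theorem pvSplitU_cons_us (t : List Char) : pvSplitU ('_' :: t) = [] :: pvSplitU t := by
  simp [pvSplitU]

theorem pvSplitU_cons_ne {c : Char} (hc : ¬ c = '_') {l p : List Char} {ps : List (List Char)}
    (h : pvSplitU l = p :: ps) : pvSplitU (c :: l) = (c :: p) :: ps := by
  simp only [pvSplitU, if_neg hc, h]

theorem pvSplitU_head_nil_iff : ∀ (l : List Char) (p : List Char) (ps : List (List Char)),
    pvSplitU l = p :: ps → (p = [] ↔ (l.head? = some '_' ∨ l = []))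
  | [], p, ps, h => by
    simp only [pvSplitU] at h
    injection h with h1 h2
    simp [← h1]
  | c :: t, p, ps, h => by
    by_cases hc : c = '_'
    · subst hc
      rw [pvSplitU_cons_us] at h
      injection h with h1 h2
      simp [← h1]
    · obtain ⟨q, qs, hq⟩ := List.exists_cons_of_ne_nil (pvSplitU_ne_nil t)
      rw [pvSplitU_cons_ne hc hq] at h
      injection h with h1 h2
      rw [← h1]
      simp [hc]

theorem pvRep_dd (t : List Char) : pvRep ('_' :: '_' :: t) = '_' :: pvRep t := by
  simp [pvRep]

theorem pvRep_other {c d : Char} (hc : ¬ (c = '_' ∧ d = '_')) (t : List Char) :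
    pvRep (c :: d :: t) = c :: pvRep (d :: t) := by
  simp only [pvRep, if_neg hc]

theorem pvRep_head? : ∀ (l : List Char), (pvRep l).head? = l.head?
  | [] => rfl
  | [c] => rfl
  | c :: d :: t => by
    by_cases hc : c = '_' ∧ d = '_'
    · obtain ⟨hc1, hc2⟩ := hc
      subst hc1; subst hc2
      rw [pvRep_dd]
      simp
    · rw [pvRep_other hc]
      simp

theorem pvRep_cons_ne_nil (c : Char) (t : List Char) : pvRep (c :: t) ≠ [] := by
  intro hy
  have h := pvRep_head? (c :: t)
  rw [hy] at h
  simp at h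

theorem pvFilt_nil_cons (xs : List (List Char)) : pvFilt ([] :: xs) = pvFilt xs := by
  simp [pvFilt]

theorem pvFilt_cons_ne {p : List Char} (hp : p ≠ []) (xs : List (List Char)) :
    pvFilt (p :: xs) = p :: pvFilt xs := by
  simp [pvFilt, hp]

theorem pvHasDD_cons_false {c : Char} {t : List Char} (h : pvHasDD (c :: t) = false) :
    pvHasDD t = false ∧ ¬ (c = '_' ∧ t.head? = some '_') := by
  rcases t with _ | ⟨d, u⟩
  · exact ⟨rfl, by simp⟩
  · simp only [pvHasDD] at h
    by_cases hc : c = '_' ∧ d = '_'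
    · rw [if_pos hc] at h; simp at h
    · rw [if_neg hc] at h
      exact ⟨h, fun hy => hc ⟨hy.1, by simpa using hy.2⟩⟩

-- rep leaves the filtered token list unchanged
theorem pvR : ∀ (l : List Char), pvFilt (pvSplitU (pvRep l)) = pvFilt (pvSplitU l)
  | [] => rfl
  | [c] => rfl
  | c :: d :: t => by
    by_cases hc : c = '_' ∧ d = '_'
    · obtain ⟨hc1, hc2⟩ := hc
      subst hc1; subst hc2
      rw [pvRep_dd]
      simp only [pvSplitU_cons_us, pvFilt_nil_cons]
      exact pvR t
    · rw [pvRep_other hc]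
      have ih := pvR (d :: t)
      by_cases hcu : c = '_'
      · subst hcu
        simp only [pvSplitU_cons_us, pvFilt_nil_cons]
        exact ih
      · obtain ⟨p, ps, hp⟩ := List.exists_cons_of_ne_nil (pvSplitU_ne_nil (d :: t))
        obtain ⟨p', ps', hp'⟩ := List.exists_cons_of_ne_nil (pvSplitU_ne_nil (pvRep (d :: t)))
        rw [pvSplitU_cons_ne hcu hp', pvSplitU_cons_ne hcu hp]
        rw [hp, hp'] at ih
        have hiff : p' = [] ↔ p = [] := by
          rw [pvSplitU_head_nil_iff (pvRep (d :: t)) p' ps' hp',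
              pvSplitU_head_nil_iff (d :: t) p ps hp]
          rw [pvRep_head?]
          simp [pvRep_cons_ne_nil]
        by_cases hpe : p = []
        · have hpe' : p' = [] := hiff.mpr hpe
          subst hpe; subst hpe'
          rw [pvFilt_nil_cons, pvFilt_nil_cons] at ih
          rw [pvFilt_cons_ne (by simp) ps', pvFilt_cons_ne (by simp) ps, ih]
        · have hpe' : p' ≠ [] := fun hy => hpe (hiff.mp hy)
          rw [pvFilt_cons_ne hpe' ps', pvFilt_cons_ne hpe ps] at ih
          injection ih with h1 h2
          rw [pvFilt_cons_ne (by simp) ps', pvFilt_cons_ne (by simp) ps, h1, h2]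
  termination_by l => l.length

theorem pvLoop_noDD (s : List Char) : pvHasDD (nlnLoop s) = false := by
  rw [nlnLoop]
  by_cases h : PySem.Chars.isIn ['_', '_'] s = true
  · rw [if_pos h]
    exact pvLoop_noDD (PySem.Chars.replace s ['_', '_'] ['_'])
  · rw [if_neg h]
    rw [← pvIsIn_eq_hasDD]
    exact Bool.not_eq_true _ |>.mp h
  termination_by s.length
  decreasing_by
    rw [pvReplace_eq_rep]
    exact pvRep_len_lt s (by rw [← pvIsIn_eq_hasDD]; exact h)

theorem pvLoop_filt (s : List Char) : pvFilt (pvSplitU (nlnLoop s)) = pvFilt (pvSplitU s) := by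
  rw [nlnLoop]
  by_cases h : PySem.Chars.isIn ['_', '_'] s = true
  · rw [if_pos h]
    rw [pvLoop_filt (PySem.Chars.replace s ['_', '_'] ['_'])]
    rw [pvReplace_eq_rep]
    exact pvR s
  · rw [if_neg h]
  termination_by s.length
  decreasing_by
    rw [pvReplace_eq_rep]
    exact pvRep_len_lt s (by rw [← pvIsIn_eq_hasDD]; exact h)

theorem pvRstrip_cons_ne {c : Char} (hc : ¬ c = '_') (t : List Char) :
    pvRstrip (c :: t) = c :: pvRstrip t := by
  unfold pvRstrip
  rw [List.reverse_cons, List.dropWhile_append]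
  split
  · rename_i he
    have hz : (List.dropWhile (fun c => c == '_') t.reverse) = [] := by
      simpa [List.isEmpty_iff] using he
    rw [List.dropWhile_cons_of_neg (by simpa using hc), hz]
    simp
  · rw [List.reverse_append]
    simp

theorem pvRstrip_cons_us (t : List Char) :
    pvRstrip ('_' :: t) = if pvRstrip t = [] then [] else '_' :: pvRstrip t := by
  unfold pvRstrip
  rw [List.reverse_cons, List.dropWhile_append]
  split
  · rename_i he
    have hz : (List.dropWhile (fun c => c == '_') t.reverse) = [] := by
      simpa [List.isEmpty_iff] using he
    rw [if_pos (by rw [hz]; rfl)]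
    rw [List.dropWhile_cons_of_pos (by simp), List.dropWhile_nil]
    rfl
  · rename_i he
    have hne : (List.dropWhile (fun c => c == '_') t.reverse) ≠ [] := by
      simpa [List.isEmpty_iff] using he
    rw [if_neg (fun hy => hne (by simpa using congrArg List.reverse hy))]
    rw [List.reverse_append]
    simp

theorem pvStrip_cons_us (t : List Char) : pvStrip ('_' :: t) = pvStrip t := by
  unfold pvStrip
  rw [List.dropWhile_cons_of_pos (by simp)]

theorem pvStrip_eq_rstrip {t : List Char} (h : t.head? ≠ some '_') : pvStrip t = pvRstrip t := by
  unfold pvStrip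
  rcases t with _ | ⟨c, u⟩
  · rfl
  · rw [List.dropWhile_cons_of_neg (by simpa using fun hy : c = '_' => h (by simp [hy]))]

theorem pvStrip_cons_ne {c : Char} (hc : ¬ c = '_') (t : List Char) :
    pvStrip (c :: t) = c :: pvRstrip t := by
  rw [pvStrip_eq_rstrip (by simpa using hc)]
  exact pvRstrip_cons_ne hc t

theorem pvJoin_ne_nil {p : List Char} (hp : p ≠ []) (ps : List (List Char)) :
    PySem.Chars.join ['_'] (p :: ps) ≠ [] := by
  rcases ps with _ | ⟨q, qs⟩
  · simpa [PySem.Chars.join_singleton] using hp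
  · rw [PySem.Chars.join_cons_cons]
    rcases p with _ | ⟨a, b⟩
    · exact absurd rfl hp
    · simp

theorem pvFilt_mem_ne_nil {xs : List (List Char)} {p : List Char} (h : p ∈ pvFilt xs) : p ≠ [] := by
  have := List.of_mem_filter h
  simpa using this

theorem pvP_aux : ∀ (n : Nat) (l : List Char), l.length ≤ n → pvHasDD l = false →
    pvStrip l = PySem.Chars.join ['_'] (pvFilt (pvSplitU l)) := by
  intro n
  induction n with
  | zero =>
    intro l hl _
    have hnil : l = [] := List.length_eq_zero_iff.mp (Nat.le_zero.mp hl)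
    subst hnil
    rw [show pvFilt (pvSplitU []) = [] from rfl, PySem.Chars.join_nil]
    rfl
  | succ n ih =>
    intro l hl h
    match l with
    | [] =>
      rw [show pvFilt (pvSplitU []) = [] from rfl, PySem.Chars.join_nil]
      rfl
    | c :: t =>
      simp only [List.length_cons] at hl
      by_cases hcu : c = '_'
      · subst hcu
        obtain ⟨ht, _⟩ := pvHasDD_cons_false h
        rw [pvStrip_cons_us, pvSplitU_cons_us, pvFilt_nil_cons]
        exact ih t (by omega) ht
      · rw [pvStrip_cons_ne hcu]
        obtain ⟨ht, hh⟩ := pvHasDD_cons_false h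
        rcases t with _ | ⟨d, u⟩
        · rw [show pvSplitU [c] = [[c]] from by simp [pvSplitU, hcu]]
          rw [pvFilt_cons_ne (by simp) []]
          rw [show pvFilt [] = [] from rfl, PySem.Chars.join_singleton]
          rfl
        · simp only [List.length_cons] at hl
          by_cases hdu : d = '_'
          · subst hdu
            obtain ⟨hu, hh2⟩ := pvHasDD_cons_false ht
            have hhu : u.head? ≠ some '_' := fun hy => hh2 ⟨rfl, hy⟩
            rw [pvRstrip_cons_us]
            rw [show pvRstrip u = pvStrip u from (pvStrip_eq_rstrip hhu).symm]
            rw [ih u (by omega) hu]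
            rw [pvSplitU_cons_ne hcu (pvSplitU_cons_us u)]
            rw [pvFilt_cons_ne (by simp) (pvSplitU u)]
            rcases hfu : pvFilt (pvSplitU u) with _ | ⟨x, xs⟩
            · rw [if_pos (PySem.Chars.join_nil ['_']), PySem.Chars.join_singleton]
            · have hx : x ≠ [] := pvFilt_mem_ne_nil (by rw [hfu]; exact List.mem_cons_self ..)
              rw [if_neg (pvJoin_ne_nil hx xs)]
              rw [PySem.Chars.join_cons_cons]
              simp
          · obtain ⟨p, ps, hp⟩ := List.exists_cons_of_ne_nil (pvSplitU_ne_nil (d :: u))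
            have hpne : p ≠ [] := by
              intro hy
              rcases (pvSplitU_head_nil_iff (d :: u) p ps hp).mp hy with h1 | h2
              · exact hdu (by simpa using h1)
              · simp at h2
            rw [show pvRstrip (d :: u) = pvStrip (d :: u) from
                  (pvStrip_eq_rstrip (by simpa using hdu)).symm]
            rw [ih (d :: u) (by simp; omega) ht]
            rw [pvSplitU_cons_ne hcu hp, hp]
            rw [pvFilt_cons_ne hpne ps, pvFilt_cons_ne (by simp) ps]
            rcases hfp : pvFilt ps with _ | ⟨x, xs⟩
            · rw [PySem.Chars.join_singleton, PySem.Chars.join_singleton]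
            · rw [PySem.Chars.join_cons_cons, PySem.Chars.join_cons_cons]
              simp

theorem pvP (l : List Char) (h : pvHasDD l = false) :
    pvStrip l = PySem.Chars.join ['_'] (pvFilt (pvSplitU l)) :=
  pvP_aux l.length l (Nat.le_refl _) h

theorem pvSplitOn_go_spec (fuel : Nat) : ∀ (l cur : List Char) (acc : List (List Char)),
    l.length < fuel →
    PySem.Chars.splitOn.go ['_'] fuel l cur acc =
      acc.reverse ++ List.modifyHead (fun x => cur.reverse ++ x) (pvSplitU l) := by
  induction fuel with
  | zero => intro l cur acc h; omega
  | succ n ih =>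
    intro l cur acc h
    match l with
    | [] =>
      show (cur.reverse :: acc).reverse = _
      simp [pvSplitU, List.modifyHead]
    | c :: t =>
      rw [show PySem.Chars.splitOn.go ['_'] (n+1) (c :: t) cur acc =
            (if List.isPrefixOf ['_'] (c :: t) then
              PySem.Chars.splitOn.go ['_'] n (List.drop 1 (c :: t)) [] (cur.reverse :: acc)
            else PySem.Chars.splitOn.go ['_'] n t (c :: cur) acc) from rfl]
      simp only [List.length_cons] at h
      by_cases hc : c = '_'
      · subst hc
        rw [if_pos (by simp [List.isPrefixOf])]
        rw [show List.drop 1 ('_' :: t) = t from rfl]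
        rw [ih t [] (cur.reverse :: acc) (by omega)]
        rw [pvSplitU_cons_us]
        obtain ⟨p, ps, hp⟩ := List.exists_cons_of_ne_nil (pvSplitU_ne_nil t)
        rw [hp]
        simp [List.modifyHead]
      · have hnp : List.isPrefixOf ['_'] (c :: t) = false := by
          rw [Bool.eq_false_iff]
          intro hy
          rw [List.isPrefixOf_iff_prefix] at hy
          obtain ⟨r, hr⟩ := hy
          simp at hr
          exact hc hr.1.symm
        rw [hnp]
        simp only [Bool.false_eq_true, if_false]
        rw [ih t (c :: cur) acc (by omega)]
        obtain ⟨p, ps, hp⟩ := List.exists_cons_of_ne_nil (pvSplitU_ne_nil t)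
        rw [hp, pvSplitU_cons_ne hc hp]
        simp [List.modifyHead]

theorem pvSplitOn_eq (l : List Char) : PySem.Chars.splitOn l ['_'] = pvSplitU l := by
  show PySem.Chars.splitOn.go ['_'] (l.length + 1) l [] [] = _
  rw [pvSplitOn_go_spec (l.length + 1) l [] [] (by omega)]
  obtain ⟨p, ps, hp⟩ := List.exists_cons_of_ne_nil (pvSplitU_ne_nil l)
  rw [hp]
  simp [List.modifyHead]

theorem pvStripChars_eq (x : List Char) : PySem.Chars.stripChars x ['_'] = pvStrip x := by
  show (List.dropWhile (fun c => List.contains ['_'] c)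
        ((List.dropWhile (fun c => List.contains ['_'] c) x).reverse)).reverse = _
  have hf : (fun c : Char => List.contains ['_'] c) = (fun c : Char => c == '_') := by
    funext c
    simp only [List.contains_cons, List.contains_nil, Bool.or_false]
  rw [hf]
  rfl

theorem pvMaster (cs : List Char) :
    PySem.Chars.stripChars (nlnLoop cs) ['_'] =
      PySem.Chars.join ['_'] ((PySem.Chars.splitOn cs ['_']).filter (fun p => !p.isEmpty)) := by
  rw [pvSplitOn_eq, pvStripChars_eq]
  rw [show (pvSplitU cs).filter (fun p => !p.isEmpty) = pvFilt (pvSplitU cs) from rfl]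
  rw [← pvLoop_filt]
  exact pvP (nlnLoop cs) (pvLoop_noDD cs)

-- ===== VERDICT (by name: the statement is the Claim_ definition above) =====
theorem normalize_label_name_py_spec : Claim_equal_normalize_label_name_py := by
  intro name _
  exact congrArg String.mk
    (pvMaster ((PySem.Str.replace (PySem.Str.replace (PySem.Str.lower name) "-" "_") " " "_").toList))
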